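-- pv_equiv track=rewrite | github.com/Kawatami/O-CALM | source/data/data_modules/NERDataModule.py | process_attention_mask_without_context
-- ===== SOURCE A (Python) =====
-- def process_attention_mask_without_context(input_ids, attention_mask, eos_token_id) :
--
--     res_attention_mask = []
--     res_token_type_ids = []
--
--     for sequence, attention_mask in zip(input_ids, attention_mask) :
--
--         current_token_type_ids = []
--         current_attention_mask = []
--         context_found = False
--
--         for id, attention in zip(sequence, attention_mask) :
--
--             # attention
--             if attention == 0 or context_found: # if outside attention or in context just ignore
--                 current_attention_mask.append(0)
--             elif id == eos_token_id : # if EOS found we are in context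
--                 context_found = True
--                 current_attention_mask.append(0)
--             else :
--                 current_attention_mask.append(1)
--
--             # context type id
--             current_token_type_ids.append(int(context_found))
--
--
--         res_attention_mask.append(current_attention_mask)
--         res_token_type_ids.append(current_token_type_ids)
--
--     return res_attention_mask, res_token_type_ids
-- ===== SOURCE B (Python) =====
-- def process_attention_mask_without_context(input_ids, attention_mask, eos_token_id):
--     res_attention_mask = []
--     res_token_type_ids = []
--     for sequence, am in zip(input_ids, attention_mask):
--         pairs = list(zip(sequence, am))
--         n = len(pairs)
--         # cut = position of the first attended EOS token, else the (truncated) length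
--         cut = next((i for i, (tok, att) in enumerate(pairs) if att != 0 and tok == eos_token_id), n)
--         res_attention_mask.append([1 if att != 0 else 0 for _, att in pairs[:cut]] + [0] * (n - cut))
--         res_token_type_ids.append([0] * cut + [1] * (n - cut))
--     return res_attention_mask, res_token_type_ids
-- ===== Notes on version B (the rewrite author's own statement) =====
-- stated objective: alternative
-- what changed: Replaces the incremental context_found flag scan with an upfront computation of the cut index (first attended EOS, else the truncated length) followed by region-shaped list construction (per-token mask before the cut, constant blocks after).
import Mathlib
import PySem

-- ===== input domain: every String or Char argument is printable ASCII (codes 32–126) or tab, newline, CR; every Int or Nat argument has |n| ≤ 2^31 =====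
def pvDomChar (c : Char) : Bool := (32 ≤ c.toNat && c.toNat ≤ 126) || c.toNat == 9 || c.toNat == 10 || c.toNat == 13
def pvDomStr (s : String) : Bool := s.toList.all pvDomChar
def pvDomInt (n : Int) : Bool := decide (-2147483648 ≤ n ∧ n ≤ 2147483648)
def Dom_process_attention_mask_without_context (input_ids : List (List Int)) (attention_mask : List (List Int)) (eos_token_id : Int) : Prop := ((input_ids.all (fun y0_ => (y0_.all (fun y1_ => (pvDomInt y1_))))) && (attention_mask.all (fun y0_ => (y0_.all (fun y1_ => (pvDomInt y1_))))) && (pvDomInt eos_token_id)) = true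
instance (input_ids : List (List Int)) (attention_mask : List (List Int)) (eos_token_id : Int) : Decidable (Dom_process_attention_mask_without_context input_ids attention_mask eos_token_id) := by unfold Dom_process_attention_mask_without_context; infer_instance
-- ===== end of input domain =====

-- B replaces the incremental context_found flag with an upfront cut-index computation followed by region-shaped list construction; same asymptotic cost.
-- ===== PORT A =====
def pvRowA (eos : Int) (cf : Bool) : List (Int × Int) → List Int × List Int
  | [] => ([], [])
  | (id, att) :: rest =>
    if att == 0 || cf then
      let p := pvRowA eos cf rest
      ((0 : Int) :: p.1, (if cf then (1 : Int) else 0) :: p.2)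
    else if id == eos then
      let p := pvRowA eos true rest
      ((0 : Int) :: p.1, (1 : Int) :: p.2)
    else
      let p := pvRowA eos cf rest
      ((1 : Int) :: p.1, (0 : Int) :: p.2)

def pvOuterA (eos : Int) : List (List Int × List Int) → List (List Int) × List (List Int)
  | [] => ([], [])
  | (s, a) :: rest =>
    let r := pvRowA eos false (s.zip a)
    let p := pvOuterA eos rest
    (r.1 :: p.1, r.2 :: p.2)

def process_attention_mask_without_context (input_ids : List (List Int)) (attention_mask : List (List Int)) (eos_token_id : Int) : List (List Int) × List (List Int) :=
  pvOuterA eos_token_id (input_ids.zip attention_mask)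

-- ===== PORT B =====
-- cut = index of the first attended EOS token, else the (truncated) length
def pvCut (eos : Int) (pairs : List (Int × Int)) : Nat :=
  match pairs.findIdx? (fun p => p.2 != 0 && p.1 == eos) with
  | some i => i
  | none => pairs.length

def pvRowB (eos : Int) (pairs : List (Int × Int)) : List Int × List Int :=
  let n := pairs.length
  let cut := pvCut eos pairs
  ((pairs.take cut).map (fun p => if p.2 != 0 then (1 : Int) else 0) ++ List.replicate (n - cut) (0 : Int),
   List.replicate cut (0 : Int) ++ List.replicate (n - cut) (1 : Int))

def pvOuterB (eos : Int) : List (List Int × List Int) → List (List Int) × List (List Int)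
  | [] => ([], [])
  | (s, a) :: rest =>
    let r := pvRowB eos (s.zip a)
    let p := pvOuterB eos rest
    (r.1 :: p.1, r.2 :: p.2)

def process_attention_mask_without_context_alt (input_ids : List (List Int)) (attention_mask : List (List Int)) (eos_token_id : Int) : List (List Int) × List (List Int) :=
  pvOuterB eos_token_id (input_ids.zip attention_mask)

-- ===== PRECONDITION & SPEC =====
def Spec_process_attention_mask_without_context (input_ids : List (List Int)) (attention_mask : List (List Int)) (eos_token_id : Int) (out : List (List Int) × List (List Int)) : Prop := out = process_attention_mask_without_context_alt input_ids attention_mask eos_token_id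
instance (input_ids : List (List Int)) (attention_mask : List (List Int)) (eos_token_id : Int) (out : List (List Int) × List (List Int)) : Decidable (Spec_process_attention_mask_without_context input_ids attention_mask eos_token_id out) := by unfold Spec_process_attention_mask_without_context; infer_instance

-- ===== CLAIM (what is proved, stated in full; the proofs are below) =====
def Claim_equal_process_attention_mask_without_context : Prop := ∀ (input_ids : List (List Int)) (attention_mask : List (List Int)) (eos_token_id : Int), Dom_process_attention_mask_without_context input_ids attention_mask eos_token_id → Spec_process_attention_mask_without_context input_ids attention_mask eos_token_id (process_attention_mask_without_context input_ids attention_mask eos_token_id)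

-- ===== LEMMAS AND PROOFS =====

lemma pvCut_cons_neg (eos : Int) (id att : Int) (rest : List (Int × Int))
    (h : ((att != 0) && (id == eos)) = false) :
    pvCut eos ((id, att) :: rest) = pvCut eos rest + 1 := by
  unfold pvCut
  simp only [List.findIdx?_cons, h]
  cases hf : rest.findIdx? (fun p => p.2 != 0 && p.1 == eos) <;> simp

lemma pvRowA_true (eos : Int) (z : List (Int × Int)) :
    pvRowA eos true z = (List.replicate z.length (0 : Int), List.replicate z.length (1 : Int)) := by
  induction z with
  | nil => simp [pvRowA]
  | cons hd tl ih =>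
    obtain ⟨id, att⟩ := hd
    simp [pvRowA, ih, List.replicate_succ]

lemma pvRowB_cons_neg (eos : Int) (id att : Int) (rest : List (Int × Int))
    (h : ((att != 0) && (id == eos)) = false) :
    pvRowB eos ((id, att) :: rest) =
      ((if att != 0 then (1 : Int) else 0) :: (pvRowB eos rest).1,
       (0 : Int) :: (pvRowB eos rest).2) := by
  simp only [pvRowB, pvCut_cons_neg eos id att rest h, List.length_cons, List.take_succ_cons,
    List.map_cons, Nat.succ_sub_succ, List.replicate_succ, List.cons_append]

lemma pvRowA_false_eq (eos : Int) (z : List (Int × Int)) :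
    pvRowA eos false z = pvRowB eos z := by
  induction z with
  | nil => simp [pvRowA, pvRowB, pvCut]
  | cons hd tl ih =>
    obtain ⟨id, att⟩ := hd
    by_cases h0 : att = 0
    · have hp : ((att != 0) && (id == eos)) = false := by simp [h0]
      rw [pvRowB_cons_neg eos id att tl hp]
      simp [pvRowA, h0, ih]
    · by_cases he : id = eos
      · subst he
        have hc : pvCut id ((id, att) :: tl) = 0 := by
          unfold pvCut; simp [List.findIdx?_cons, h0]
        simp [pvRowA, pvRowB, hc, h0, pvRowA_true, List.replicate_succ]
      · have hp : ((att != 0) && (id == eos)) = false := by simp [he]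
        rw [pvRowB_cons_neg eos id att tl hp]
        simp [pvRowA, h0, he, ih]

lemma pvOuter_eq (eos : Int) (z : List (List Int × List Int)) :
    pvOuterA eos z = pvOuterB eos z := by
  induction z with
  | nil => rfl
  | cons hd tl ih =>
    obtain ⟨s, a⟩ := hd
    simp [pvOuterA, pvOuterB, ih, pvRowA_false_eq]


-- ===== VERDICT (by name: the statement is the Claim_ definition above) =====
theorem process_attention_mask_without_context_spec : Claim_equal_process_attention_mask_without_context := by
  intro input_ids attention_mask eos_token_id _
  unfold Spec_process_attention_mask_without_context process_attention_mask_without_context process_attention_mask_without_context_alt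
  exact pvOuter_eq _ _
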